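-- pv_equiv track=rewrite | github.com/adddvent/AoC-2020-Python | src/17.py | calc_conway_cubes
-- ===== SOURCE A (Python) =====
-- import itertools
--
-- def calc_conway_cubes(occupied_fields, num_cycles=6, use_w_dimension=False):
--     if use_w_dimension:
--         dw_list = [-1, 0, 1]
--     else:
--         dw_list = [0]
--
--     for i in range(num_cycles):
--         occupied_fields_new = set()
--
--         fields_to_check = set()
--         for (x, y, z, w) in occupied_fields:
--             for dx, dy, dz, dw in itertools.product([-1, 0, 1], [-1, 0, 1], [-1, 0, 1], dw_list):
--                 fields_to_check.add((x+dx, y+dy, z+dz, w+dw))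
--
--         for (x, y, z, w) in fields_to_check:
--             num_active_neighbors = 0
--             v = (x, y, z, w) in occupied_fields
--             for dx, dy, dz, dw in itertools.product([-1, 0, 1], [-1, 0, 1], [-1, 0, 1], dw_list):
--                 if dx == 0 and dy == 0 and dz == 0 and dw == 0:
--                     continue
--                 x2, y2, z2, w2 = x+dx, y+dy, z+dz, w+dw
--                 if (x2, y2, z2, w2) in occupied_fields:
--                     num_active_neighbors += 1
--
--             if v and num_active_neighbors in [2, 3]:
--                 occupied_fields_new.add((x, y, z, w))
--             elif not v and num_active_neighbors == 3:
--                 occupied_fields_new.add((x, y, z, w))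
--
--         occupied_fields = occupied_fields_new
--
--     return occupied_fields
-- ===== SOURCE B (Python) =====
-- import itertools
--
-- def calc_conway_cubes(occupied_fields, num_cycles=6, use_w_dimension=False):
--     # One pass per cycle: tally each active cell's whole 3x3x3(x3) neighbourhood into a
--     # dict (the cell itself contributes 0, so every candidate gets an entry), then apply
--     # the rules to the tallies -- no per-candidate rescan of the 26/80 neighbours.
--     if use_w_dimension:
--         dw_list = [-1, 0, 1]
--     else:
--         dw_list = [0]
--     deltas = list(itertools.product([-1, 0, 1], [-1, 0, 1], [-1, 0, 1], dw_list))
--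
--     for _ in range(num_cycles):
--         counts = {}
--         for (x, y, z, w) in occupied_fields:
--             for dx, dy, dz, dw in deltas:
--                 key = (x + dx, y + dy, z + dz, w + dw)
--                 counts[key] = counts.get(key, 0) + (0 if dx == 0 and dy == 0 and dz == 0 and dw == 0 else 1)
--         occupied_fields = {c for c, n in counts.items()
--                            if n == 3 or (n == 2 and c in occupied_fields)}
--     return occupied_fields
-- ===== Notes on version B (the rewrite author's own statement) =====
-- stated objective: faster
-- what changed: Per cycle B makes a single tally pass -- each active cell adds 1 to a dict entry for every neighbour (and 0 for itself, so all candidates appear) -- and then applies the survival/birth rules to the tallies, replacing A's rescan of the full 26/80-cell neighbourhood for every candidate.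
import Mathlib
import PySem

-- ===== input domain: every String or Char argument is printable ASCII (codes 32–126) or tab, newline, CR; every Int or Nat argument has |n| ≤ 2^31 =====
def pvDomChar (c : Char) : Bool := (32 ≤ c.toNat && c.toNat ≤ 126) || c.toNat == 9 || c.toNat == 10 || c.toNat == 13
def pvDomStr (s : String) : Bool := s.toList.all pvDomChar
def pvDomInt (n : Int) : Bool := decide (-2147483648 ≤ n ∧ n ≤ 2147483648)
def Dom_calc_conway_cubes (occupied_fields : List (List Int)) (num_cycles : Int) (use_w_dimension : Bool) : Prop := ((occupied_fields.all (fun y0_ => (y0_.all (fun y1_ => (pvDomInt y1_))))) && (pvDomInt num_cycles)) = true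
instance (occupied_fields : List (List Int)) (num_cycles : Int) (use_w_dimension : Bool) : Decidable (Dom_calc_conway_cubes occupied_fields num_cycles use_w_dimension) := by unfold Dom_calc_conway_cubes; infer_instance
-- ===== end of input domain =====

-- B replaces A's per-candidate rescan of all 26/80 neighbours by one tally pass per cycle
-- (each active cell adds 1 to each neighbour's dict entry, 0 to its own), then applies the
-- rules to the tallies: measurably faster by a constant factor. Proved equal (as lists, hence
-- as sets) on distinct length-4 rows, which is what the Python set-of-4-tuples argument holds.

-- itertools.product([-1,0,1],[-1,0,1],[-1,0,1],dw_list)  (shared by both Pythons)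
def pvDeltas (dwl : List Int) : List (Int × Int × Int × Int) :=
  [-1, 0, 1].flatMap fun dx =>
    [-1, 0, 1].flatMap fun dy =>
      [-1, 0, 1].flatMap fun dz => dwl.map fun dw => (dx, dy, dz, dw)

-- the tuple (x+dx, y+dy, z+dz, w+dw)
def pvNbr (x y z w : Int) (d : Int × Int × Int × Int) : List Int :=
  [x + d.1, y + d.2.1, z + d.2.2.1, w + d.2.2.2]

-- ===== PORT A =====
-- fields_to_check: the set of all cells in the neighbourhood (incl. itself) of an active cell
def pvCandidatesA (dwl : List Int) (occ : List (List Int)) : PySem.Set (List Int) :=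
  occ.foldl (fun s c =>
    match c with
    | [x, y, z, w] => (pvDeltas dwl).foldl (fun s d => PySem.Set.add s (pvNbr x y z w d)) s
    | _ => s) PySem.Set.empty

-- the inner neighbour-counting loop of A
def pvCountA (dwl : List Int) (occ : List (List Int)) (x y z w : Int) : Int :=
  (pvDeltas dwl).foldl (fun n d =>
    if d = (0, 0, 0, 0) then n
    else if PySem.Set.contains occ (pvNbr x y z w d) then n + 1 else n) 0

-- one cycle of A
def pvStepA (dwl : List Int) (occ : List (List Int)) : List (List Int) :=
  (pvCandidatesA dwl occ).foldl (fun s c =>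
    match c with
    | [x, y, z, w] =>
      let v := PySem.Set.contains occ c
      let n := pvCountA dwl occ x y z w
      if v && (n == 2 || n == 3) then PySem.Set.add s c
      else if !v && n == 3 then PySem.Set.add s c
      else s
    | _ => s) PySem.Set.empty

def pvLoopA (dwl : List Int) : Nat → List (List Int) → List (List Int)
  | 0, occ => occ
  | n + 1, occ => pvLoopA dwl n (pvStepA dwl occ)

def calc_conway_cubes (occupied_fields : List (List Int)) (num_cycles : Int) (use_w_dimension : Bool) : List (List Int) :=
  let dwl : List Int := if use_w_dimension then [-1, 0, 1] else [0]
  pvLoopA dwl num_cycles.toNat occupied_fields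

-- ===== PORT B =====
-- 0 if the delta is the zero offset, else 1 (a cell contributes 0 to itself, 1 to a neighbour)
def pvInc (d : Int × Int × Int × Int) : Int := if d = (0, 0, 0, 0) then 0 else 1

-- one cycle of B: tally the whole neighbourhood of every active cell, then apply the rules
def pvStepB (dwl : List Int) (occ : List (List Int)) : List (List Int) :=
  let counts : PySem.Dict (List Int) Int :=
    occ.foldl (fun cnt c =>
      match c with
      | [x, y, z, w] =>
        (pvDeltas dwl).foldl (fun cnt d =>
          let k := pvNbr x y z w d
          cnt.insert k (cnt.getD k 0 + pvInc d)) cnt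
      | _ => cnt) PySem.Dict.empty
  counts.items.foldl (fun s p =>
    if p.2 == 3 || (p.2 == 2 && PySem.Set.contains occ p.1) then PySem.Set.add s p.1
    else s) PySem.Set.empty

def pvLoopB (dwl : List Int) : Nat → List (List Int) → List (List Int)
  | 0, occ => occ
  | n + 1, occ => pvLoopB dwl n (pvStepB dwl occ)

def calc_conway_cubes_alt (occupied_fields : List (List Int)) (num_cycles : Int) (use_w_dimension : Bool) : List (List Int) :=
  let dwl : List Int := if use_w_dimension then [-1, 0, 1] else [0]
  pvLoopB dwl num_cycles.toNat occupied_fields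

-- ===== PRECONDITION & SPEC =====
-- occupied_fields encodes the Python set-of-4-tuples argument: its rows are distinct, and when
-- at least one cycle runs A unpacks every row as (x, y, z, w), raising ValueError unless each
-- row has length 4; Pre_ excludes nothing on which the Python A returns.
def Pre_calc_conway_cubes (occupied_fields : List (List Int)) (num_cycles : Int) (use_w_dimension : Bool) : Prop :=
  occupied_fields.Nodup ∧ (0 < num_cycles → ∀ r ∈ occupied_fields, r.length = 4)
instance (occupied_fields : List (List Int)) (num_cycles : Int) (use_w_dimension : Bool) : Decidable (Pre_calc_conway_cubes occupied_fields num_cycles use_w_dimension) := by unfold Pre_calc_conway_cubes; infer_instance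

def pvWitness_calc_conway_cubes : List (List Int) × Int × Bool :=
  ([[0, 0, 0, 0], [1, 0, 0, 0], [2, 0, 0, 0]], 2, false)

def Spec_calc_conway_cubes (occupied_fields : List (List Int)) (num_cycles : Int) (use_w_dimension : Bool) (out : List (List Int)) : Prop := out = calc_conway_cubes_alt occupied_fields num_cycles use_w_dimension
instance (occupied_fields : List (List Int)) (num_cycles : Int) (use_w_dimension : Bool) (out : List (List Int)) : Decidable (Spec_calc_conway_cubes occupied_fields num_cycles use_w_dimension out) := by unfold Spec_calc_conway_cubes; infer_instance

-- ===== CLAIM (what is proved, stated in full; the proofs are below) =====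
def Claim_equal_calc_conway_cubes : Prop := ∀ (occupied_fields : List (List Int)) (num_cycles : Int) (use_w_dimension : Bool), Dom_calc_conway_cubes occupied_fields num_cycles use_w_dimension → Pre_calc_conway_cubes occupied_fields num_cycles use_w_dimension → Spec_calc_conway_cubes occupied_fields num_cycles use_w_dimension (calc_conway_cubes occupied_fields num_cycles use_w_dimension)

-- ===== LEMMAS AND PROOFS =====

-- the neighbourhood contribution list of one cell: (neighbour, increment) pairs
def pvG (dwl : List Int) (c : List Int) : List (List Int × Int) :=
  match c with
  | [x, y, z, w] => (pvDeltas dwl).map (fun d => (pvNbr x y z w d, pvInc d))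
  | _ => []

def pvFlat (dwl : List Int) (occ : List (List Int)) : List (List Int × Int) :=
  occ.flatMap (pvG dwl)

def pvDStep (cnt : PySem.Dict (List Int) Int) (p : List Int × Int) : PySem.Dict (List Int) Int :=
  cnt.insert p.1 (cnt.getD p.1 0 + p.2)

def pvWeight (l : List (List Int × Int)) (c : List Int) : Int :=
  (l.map (fun p => if p.1 = c then p.2 else 0)).sum

def pvSub (x y z w : Int) (d : Int × Int × Int × Int) : List Int :=
  [x - d.1, y - d.2.1, z - d.2.2.1, w - d.2.2.2]

def pvNeg (d : Int × Int × Int × Int) : Int × Int × Int × Int :=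
  (-d.1, -d.2.1, -d.2.2.1, -d.2.2.2)

theorem pv_cand_eq (dwl : List Int) (occ : List (List Int)) :
    pvCandidatesA dwl occ = PySem.Set.ofList ((pvFlat dwl occ).map Prod.fst) := by
  have key : ∀ (occ : List (List Int)) (s : PySem.Set (List Int)),
      occ.foldl (fun s c =>
        match c with
        | [x, y, z, w] => (pvDeltas dwl).foldl (fun s d => PySem.Set.add s (pvNbr x y z w d)) s
        | _ => s) s = PySem.Set.update s ((pvFlat dwl occ).map Prod.fst) := by
    intro occ
    induction occ with
    | nil => intro s; simp [pvFlat, PySem.Set.update_nil]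
    | cons c occ ih =>
      intro s
      have hbody : (match c with
          | [x, y, z, w] => (pvDeltas dwl).foldl (fun s d => PySem.Set.add s (pvNbr x y z w d)) s
          | _ => s) = PySem.Set.update s ((pvG dwl c).map Prod.fst) := by
        rcases c with _ | ⟨x, _ | ⟨y, _ | ⟨z, _ | ⟨w, _ | ⟨e, r⟩⟩⟩⟩⟩ <;>
          simp [pvG, PySem.Set.update_nil, List.map_map, Function.comp_def,
            ← PySem.Set.update_map_eq_foldl_add]
      show List.foldl _ ((match c with
          | [x, y, z, w] => (pvDeltas dwl).foldl (fun s d => PySem.Set.add s (pvNbr x y z w d)) s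
          | _ => s)) occ = _
      rw [hbody, ih]
      simp [pvFlat, List.flatMap_cons, ← PySem.Set.update_append]
  show List.foldl _ _ _ = _
  rw [key occ PySem.Set.empty]
  exact PySem.Set.update_nil_left _

-- B's tally dict is the flat contribution list folded with insert-add
theorem pv_dict_eq (dwl : List Int) (occ : List (List Int)) :
    occ.foldl (fun cnt c =>
      match c with
      | [x, y, z, w] =>
        (pvDeltas dwl).foldl (fun cnt d =>
          let k := pvNbr x y z w d
          cnt.insert k (cnt.getD k 0 + pvInc d)) cnt
      | _ => cnt) PySem.Dict.empty = (pvFlat dwl occ).foldl pvDStep PySem.Dict.empty := by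
  rw [pvFlat, List.foldl_flatMap]
  apply PySem.List.foldl_congr_mem
  intro cnt c _
  rcases c with _ | ⟨x, _ | ⟨y, _ | ⟨z, _ | ⟨w, _ | ⟨e, r⟩⟩⟩⟩⟩ <;>
    simp [pvG, List.foldl_map, pvDStep]

theorem pv_getD (l : List (List Int × Int)) (cnt : PySem.Dict (List Int) Int) (c : List Int) :
    (l.foldl pvDStep cnt).getD c 0 = cnt.getD c 0 + pvWeight l c := by
  induction l generalizing cnt with
  | nil => simp [pvWeight]
  | cons p l ih =>
    rw [List.foldl_cons, ih]
    show (cnt.insert p.1 (cnt.getD p.1 0 + p.2)).getD c 0 + _ = _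
    rw [PySem.Dict.getD_insert]
    simp only [pvWeight, List.map_cons, List.sum_cons]
    by_cases h : p.1 = c
    · simp [h]; ring
    · simp [h]
      intro hc; exact absurd hc.symm h

theorem pv_keys (dwl : List Int) (occ : List (List Int)) :
    ((pvFlat dwl occ).foldl pvDStep PySem.Dict.empty).keys
      = PySem.Set.ofList ((pvFlat dwl occ).map Prod.fst) := by
  have := PySem.Dict.keys_foldl_insert_key (ν := Int) (pvFlat dwl occ) Prod.fst
    (fun cnt p => cnt.getD p.1 0 + p.2) PySem.Dict.empty
  rw [show (fun (d : PySem.Dict (List Int) Int) (x : List Int × Int) =>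
      d.insert x.1 (d.getD x.1 0 + x.2)) = pvDStep from rfl] at this
  rw [this]
  rw [show (PySem.Dict.empty : PySem.Dict (List Int) Int).keys = [] from rfl, PySem.Set.update_nil_left]

theorem pv_weight_append (l1 l2 : List (List Int × Int)) (c : List Int) :
    pvWeight (l1 ++ l2) c = pvWeight l1 c + pvWeight l2 c := by
  simp [pvWeight]

theorem pv_sum_zero {α : Type} (l : List α) : (l.map (fun _ => (0 : Int))).sum = 0 := by
  induction l <;> simp_all

theorem pv_weight_flatMap (occ : List (List Int)) (g : List Int → List (List Int × Int)) (c : List Int) :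
    pvWeight (occ.flatMap g) c = (occ.map (fun a => pvWeight (g a) c)).sum := by
  induction occ with
  | nil => simp [pvWeight]
  | cons a occ ih => simp [List.flatMap_cons, pv_weight_append, ih]

-- per-cell contribution to candidate [x,y,z,w], written as an indicator of the cell
theorem pv_weight_cell (dwl : List Int) (cell : List Int) (x y z w : Int) :
    pvWeight (pvG dwl cell) [x, y, z, w]
      = ((pvDeltas dwl).map (fun d => if cell = pvSub x y z w d then pvInc d else 0)).sum := by
  rcases cell with _ | ⟨a, _ | ⟨b, _ | ⟨e, _ | ⟨f, _ | ⟨g5, r⟩⟩⟩⟩⟩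
  case nil => simp [pvG, pvWeight, pvSub]
  case cons.nil => simp [pvG, pvWeight, pvSub]
  case cons.cons.nil => simp [pvG, pvWeight, pvSub]
  case cons.cons.cons.nil => simp [pvG, pvWeight, pvSub]
  case cons.cons.cons.cons.cons =>
    simp [pvG, pvWeight, pvSub]
  case cons.cons.cons.cons.nil =>
    simp only [pvG, pvWeight, List.map_map]
    refine congrArg List.sum (List.map_congr_left ?_)
    intro d _
    have h : (pvNbr a b e f d = [x, y, z, w]) ↔ ([a, b, e, f] = pvSub x y z w d) := by
      simp only [pvNbr, pvSub, List.cons.injEq, and_true]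
      constructor <;> (rintro ⟨h1, h2, h3, h4⟩; refine ⟨by omega, by omega, by omega, by omega⟩)
    simp only [Function.comp]
    by_cases hc : pvNbr a b e f d = [x, y, z, w]
    · rw [if_pos hc, if_pos (h.mp hc)]
    · rw [if_neg hc, if_neg (fun hh => hc (h.mpr hh))]

theorem pv_sum_comm {α β : Type} (l1 : List α) (l2 : List β) (F : α → β → Int) :
    (l1.map (fun a => (l2.map (F a)).sum)).sum
      = (l2.map (fun b => (l1.map (fun a => F a b)).sum)).sum := by
  induction l1 with
  | nil => simp
  | cons a l1 ih =>
    simp only [List.map_cons, List.sum_cons, ih]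
    rw [PySem.List.sum_map_add_int]

theorem pv_sum_indicator {α : Type} [DecidableEq α] (l : List α) (t : α) (v : Int)
    (hnd : l.Nodup) : (l.map (fun x => if x = t then v else 0)).sum = if t ∈ l then v else 0 := by
  induction l with
  | nil => simp
  | cons a l ih =>
    rcases List.nodup_cons.mp hnd with ⟨ha, hl⟩
    by_cases hat : a = t
    · subst hat
      have : (l.map (fun x => if x = a then v else 0)).sum = 0 := by
        rw [show (fun x => if x = a then v else 0) = fun x : α => if x ∈ ([a] : List α) then v else 0 from by
          funext x; simp]
        calc _ = (l.map (fun _ => (0:Int))).sum := by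
                refine congrArg List.sum (List.map_congr_left ?_)
                intro x hx; simp; intro hxa; exact absurd (hxa ▸ hx) ha
             _ = 0 := pv_sum_zero l
      simp [this]
    · simp only [List.map_cons, List.sum_cons, if_neg hat, ih hl, List.mem_cons]
      have hta : ¬ t = a := fun h => hat h.symm
      by_cases ht : t ∈ l <;> simp [ht, hta]

-- the delta grid negated is the delta grid reversed (for both dw_list choices)
theorem pv_neg_deltas (dwl : List Int) (hd : dwl = [0] ∨ dwl = [-1, 0, 1]) :
    (pvDeltas dwl).map pvNeg = (pvDeltas dwl).reverse := by
  rcases hd with h | h <;> subst h <;> decide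

theorem pv_inc_neg (d : Int × Int × Int × Int) : pvInc (pvNeg d) = pvInc d := by
  obtain ⟨a, b, c, e⟩ := d
  simp only [pvInc, pvNeg, Prod.mk.injEq]
  by_cases h : a = 0 ∧ b = 0 ∧ c = 0 ∧ e = 0
  · obtain ⟨rfl, rfl, rfl, rfl⟩ := h; simp
  · rw [if_neg (by omega), if_neg (by omega)]

theorem pv_sub_neg (x y z w : Int) (d : Int × Int × Int × Int) :
    pvSub x y z w (pvNeg d) = pvNbr x y z w d := by
  simp [pvSub, pvNeg, pvNbr, sub_neg_eq_add]

-- A's inner rescan, as a sum over the delta grid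
theorem pv_countA_sum (dwl : List Int) (occ : List (List Int)) (x y z w : Int) :
    pvCountA dwl occ x y z w
      = ((pvDeltas dwl).map (fun d => if pvNbr x y z w d ∈ occ then pvInc d else 0)).sum := by
  unfold pvCountA
  rw [PySem.List.foldl_congr_mem _ _
    (fun n d => n + (if pvNbr x y z w d ∈ occ then pvInc d else 0)) 0 ?_]
  · rw [PySem.List.foldl_add, zero_add]
  · intro n d _
    by_cases h0 : d = (0, 0, 0, 0) <;> by_cases hm : pvNbr x y z w d ∈ occ <;>
      simp [h0, hm, pvInc]

-- the tallied weight of a candidate equals A's rescanned neighbour count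
theorem pv_weight_eq_count (dwl : List Int) (hd : dwl = [0] ∨ dwl = [-1, 0, 1])
    (occ : List (List Int)) (hnd : occ.Nodup) (x y z w : Int) :
    pvWeight (pvFlat dwl occ) [x, y, z, w] = pvCountA dwl occ x y z w := by
  rw [pvFlat, pv_weight_flatMap]
  rw [show (occ.map (fun a => pvWeight (pvG dwl a) [x, y, z, w]))
      = occ.map (fun cell => ((pvDeltas dwl).map
          (fun d => if cell = pvSub x y z w d then pvInc d else 0)).sum) from
    List.map_congr_left (fun cell _ => pv_weight_cell dwl cell x y z w)]
  rw [pv_sum_comm]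
  have h2 : ∀ d, ((occ.map (fun a => if a = pvSub x y z w d then pvInc d else 0)).sum)
      = if pvSub x y z w d ∈ occ then pvInc d else 0 :=
    fun d => by
      have h := pv_sum_indicator occ (pvSub x y z w d) (pvInc d) hnd
      convert h using 2
  simp only [h2]
  have hsym : ((pvDeltas dwl).map (fun d => if pvSub x y z w d ∈ occ then pvInc d else 0)).sum
      = ((pvDeltas dwl).map (fun d => if pvNbr x y z w d ∈ occ then pvInc d else 0)).sum := by
    calc ((pvDeltas dwl).map (fun d => if pvSub x y z w d ∈ occ then pvInc d else 0)).sum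
        = (((pvDeltas dwl).map pvNeg).map (fun d => if pvSub x y z w d ∈ occ then pvInc d else 0)).sum := by
          rw [pv_neg_deltas dwl hd, List.map_reverse, List.sum_reverse]
      _ = ((pvDeltas dwl).map (fun d => if pvSub x y z w (pvNeg d) ∈ occ then pvInc (pvNeg d) else 0)).sum := by
          rw [List.map_map]; rfl
      _ = ((pvDeltas dwl).map (fun d => if pvNbr x y z w d ∈ occ then pvInc d else 0)).sum := by
          refine congrArg List.sum (List.map_congr_left ?_)
          intro d _
          rw [pv_sub_neg, pv_inc_neg]
  rw [hsym, pv_countA_sum]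

theorem pv_shape (dwl : List Int) (occ : List (List Int)) (c : List Int)
    (h : c ∈ (pvFlat dwl occ).map Prod.fst) : ∃ x y z w : Int, c = [x, y, z, w] := by
  obtain ⟨p, hp, rfl⟩ := List.mem_map.mp h
  obtain ⟨cell, _, hpg⟩ := List.mem_flatMap.mp hp
  rcases cell with _ | ⟨a, _ | ⟨b, _ | ⟨e, _ | ⟨f, _ | ⟨g5, r⟩⟩⟩⟩⟩ <;>
    simp [pvG] at hpg
  obtain ⟨d1, d2, d3, d4, _, hp⟩ := hpg
  exact ⟨a + d1, b + d2, e + d3, f + d4, by rw [← hp]; rfl⟩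

theorem pv_step_eq (dwl : List Int) (hd : dwl = [0] ∨ dwl = [-1, 0, 1])
    (occ : List (List Int)) (hnd : occ.Nodup) : pvStepA dwl occ = pvStepB dwl occ := by
  unfold pvStepA pvStepB
  rw [pv_cand_eq]
  simp only [pv_dict_eq]
  rw [PySem.Dict.items_eq_map_keys _ (by
      rw [pv_keys]; exact PySem.Set.nodup_ofList _) 0]
  rw [pv_keys, List.foldl_map]
  apply PySem.List.foldl_congr_mem
  intro s c hc
  obtain ⟨x, y, z, w, rfl⟩ := pv_shape dwl occ _ (by
    simpa using (PySem.Set.mem_ofList _ _).mp hc)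
  have hn : ((pvFlat dwl occ).foldl pvDStep PySem.Dict.empty).getD [x, y, z, w] 0
      = pvCountA dwl occ x y z w := by
    rw [pv_getD, pv_weight_eq_count dwl hd occ hnd]
    simp
  show (let v := PySem.Set.contains occ [x, y, z, w]
        let n := pvCountA dwl occ x y z w
        if v && (n == 2 || n == 3) then PySem.Set.add s [x, y, z, w]
        else if !v && n == 3 then PySem.Set.add s [x, y, z, w]
        else s)
      = if _ then _ else _
  rw [hn]
  simp only []
  by_cases hm : [x, y, z, w] ∈ occ <;>
    by_cases h2 : pvCountA dwl occ x y z w = 2 <;>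
    by_cases h3 : pvCountA dwl occ x y z w = 3 <;>
    simp [hm, h2, h3]

theorem pv_step_nodup (dwl : List Int) (occ : List (List Int)) : (pvStepA dwl occ).Nodup := by
  unfold pvStepA
  have key : ∀ (l : List (List Int)) (s : PySem.Set (List Int)), s.Nodup →
      (l.foldl (fun s c =>
        match c with
        | [x, y, z, w] =>
          let v := PySem.Set.contains occ c
          let n := pvCountA dwl occ x y z w
          if v && (n == 2 || n == 3) then PySem.Set.add s c
          else if !v && n == 3 then PySem.Set.add s c
          else s
        | _ => s) s).Nodup := by
    intro l
    induction l with
    | nil => intro s hs; exact hs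
    | cons c l ih =>
      intro s hs
      refine ih _ ?_
      rcases c with _ | ⟨x, _ | ⟨y, _ | ⟨z, _ | ⟨w, _ | ⟨e, r⟩⟩⟩⟩⟩ <;>
        first
        | exact hs
        | · dsimp only
            split_ifs <;> first | exact PySem.Set.nodup_add _ _ hs | exact hs
  exact key _ _ List.nodup_nil

theorem pv_loop_eq (dwl : List Int) (hd : dwl = [0] ∨ dwl = [-1, 0, 1]) (n : Nat)
    (occ : List (List Int)) (hnd : occ.Nodup) : pvLoopA dwl n occ = pvLoopB dwl n occ := by
  induction n generalizing occ with
  | zero => rfl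
  | succ n ih =>
    show pvLoopA dwl n (pvStepA dwl occ) = pvLoopB dwl n (pvStepB dwl occ)
    rw [← pv_step_eq dwl hd occ hnd]
    exact ih _ (pv_step_nodup dwl occ)

-- ===== VERDICT (by name: the statement is the Claim_ definition above) =====
theorem calc_conway_cubes_spec : Claim_equal_calc_conway_cubes := by
  intro occ n w _ hpre
  show calc_conway_cubes occ n w = calc_conway_cubes_alt occ n w
  unfold calc_conway_cubes calc_conway_cubes_alt
  cases w <;> exact pv_loop_eq _ (by simp) _ occ hpre.1
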